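-- pv_equiv track=rewrite | github.com/AdrianPerezGarcia/PracticasSegInf | Practica6/Functions.py | blocksToIntegers
-- ===== SOURCE A (Python) =====
-- def blocksToIntegers(blocks, mod):
--     integers = []
--     for element in blocks:
--         # Se invierte el array para hacer el ultimo * modulo a la 0, penultimo * modulo a la 1 ...
--         element.reverse()
--         integer = 0
--         for i in range(len(element)):
--             integer += element[i] * (mod ** i)
--         integers.append(integer)
--     return integers
-- ===== SOURCE B (Python) =====
-- def blocksToIntegers(blocks, mod):
--     # Horner's rule: one pass per block, no power recomputation (note: unlike A, does not reverse blocks in place)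
--     integers = []
--     for element in blocks:
--         integer = 0
--         for digit in element:
--             integer = integer * mod + digit
--         integers.append(integer)
--     return integers
-- ===== Notes on version B (the rewrite author's own statement) =====
-- stated objective: faster
-- what changed: Replaces the reverse-then-sum-of-digit-times-mod**i loop by a single Horner pass (integer = integer*mod + digit) over each block, avoiding recomputing mod**i for every position and the in-place reversal.
import Mathlib
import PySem

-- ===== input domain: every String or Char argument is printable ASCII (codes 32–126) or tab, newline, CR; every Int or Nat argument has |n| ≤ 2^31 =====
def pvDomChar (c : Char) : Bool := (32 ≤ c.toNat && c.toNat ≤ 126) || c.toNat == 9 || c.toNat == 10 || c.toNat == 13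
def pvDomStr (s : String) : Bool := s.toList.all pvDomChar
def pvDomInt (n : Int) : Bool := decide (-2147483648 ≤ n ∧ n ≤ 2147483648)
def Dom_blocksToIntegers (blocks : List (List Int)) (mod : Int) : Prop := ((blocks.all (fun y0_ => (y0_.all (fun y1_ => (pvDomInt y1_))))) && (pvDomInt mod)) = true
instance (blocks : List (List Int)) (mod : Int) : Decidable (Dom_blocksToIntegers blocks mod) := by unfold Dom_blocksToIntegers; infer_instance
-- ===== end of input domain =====

-- ===== PORT A =====
-- Port of A. A mutates each block in place (element.reverse()); the equivalence proved here is about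
-- the RETURN value only. range(len(element)) indexing is always in range, so List.getD is exact.
def blocksToIntegers (blocks : List (List Int)) (mod : Int) : List Int :=
  blocks.foldl (fun integers element =>
    let r := element.reverse
    let integer := (List.range r.length).foldl (fun integer i => integer + r.getD i 0 * mod ^ i) 0
    integers ++ [integer]) []

-- ===== PORT B =====
-- B: Horner's rule per block, one pass, no power recomputation and no reversal.
def blocksToIntegers_alt (blocks : List (List Int)) (mod : Int) : List Int :=
  blocks.foldl (fun integers element =>
    integers ++ [element.foldl (fun integer digit => integer * mod + digit) 0]) []

-- ===== PRECONDITION & SPEC =====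
def Spec_blocksToIntegers (blocks : List (List Int)) (mod : Int) (out : List Int) : Prop := out = blocksToIntegers_alt blocks mod
instance (blocks : List (List Int)) (mod : Int) (out : List Int) : Decidable (Spec_blocksToIntegers blocks mod out) := by unfold Spec_blocksToIntegers; infer_instance

-- ===== CLAIM (what is proved, stated in full; the proofs are below) =====
def Claim_equal_blocksToIntegers : Prop := ∀ (blocks : List (List Int)) (mod : Int), Dom_blocksToIntegers blocks mod → Spec_blocksToIntegers blocks mod (blocksToIntegers blocks mod)

-- ===== LEMMAS AND PROOFS =====

-- Horner with accumulator a over l equals a·mod^|l| plus the sum of reversed digits times powers of mod.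
theorem pv_horner_eq (mod : Int) : ∀ (l : List Int) (a : Int),
    l.foldl (fun acc x => acc * mod + x) a
      = a * mod ^ l.length
        + ((List.range l.length).map (fun i => l.reverse.getD i 0 * mod ^ i)).sum := by
  intro l
  induction l with
  | nil => intro a; simp
  | cons x t ih =>
    intro a
    have hlen : t.reverse.length = t.length := by simp
    have hmapeq :
        (List.range t.length).map (fun i => (t.reverse ++ [x]).getD i 0 * mod ^ i)
          = (List.range t.length).map (fun i => t.reverse.getD i 0 * mod ^ i) := by
      apply List.map_congr_left
      intro i hi
      rw [List.getD_append t.reverse [x] 0 i (by simpa [hlen] using List.mem_range.mp hi)]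
    have hlast : (t.reverse ++ [x]).getD t.length 0 = x := by
      have : (t.reverse ++ [x]).getD t.length 0 = [x].getD (t.length - t.reverse.length) 0 :=
        List.getD_append_right t.reverse [x] 0 t.length (by simp)
      simpa [hlen] using this
    simp only [List.foldl_cons, List.length_cons, List.reverse_cons, ih (a * mod + x),
      List.range_succ, List.map_append, List.sum_append, hmapeq]
    simp [hlast]
    ring

-- Per-block agreement: A's indexed power sum over the reversed block equals B's Horner pass.
theorem pv_block_eq (mod : Int) (element : List Int) :
    (List.range element.reverse.length).foldl
        (fun integer i => integer + element.reverse.getD i 0 * mod ^ i) 0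
      = element.foldl (fun integer digit => integer * mod + digit) 0 := by
  rw [PySem.List.foldl_add, pv_horner_eq mod element 0]
  simp

-- ===== VERDICT (by name: the statement is the Claim_ definition above) =====
theorem blocksToIntegers_spec : Claim_equal_blocksToIntegers := by
  intro blocks mod _
  unfold Spec_blocksToIntegers blocksToIntegers blocksToIntegers_alt
  rw [PySem.List.foldl_append_singleton_eq_map, PySem.List.foldl_append_singleton_eq_map]
  simp only [List.nil_append]
  apply List.map_congr_left
  intro element _
  exact pv_block_eq mod element
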